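-- pv_equiv track=rewrite | github.com/chjaeggi/aoc-2019-python | days/day11/day11.py | _create_image_vector
-- ===== SOURCE A (Python) =====
-- def _create_image_vector(image_map, max_x, max_y):
--     pic = []
--     for row in range(max_y + 1):
--         for col in range(max_x + 1):
--             try:
--                 res = image_map[(col, row)]
--                 pic.append(res)
--             except KeyError:
--                 pic.append(0)
--     return pic
-- ===== SOURCE B (Python) =====
-- def _create_image_vector(image_map, max_x, max_y):
--     w = max_x + 1 if max_x >= 0 else 0
--     h = max_y + 1 if max_y >= 0 else 0
--     pic = [0] * (w * h)
--     for (col, row), val in image_map.items():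
--         if 0 <= col < w and 0 <= row < h:
--             pic[row * w + col] = val
--     return pic
-- ===== Notes on version B (the rewrite author's own statement) =====
-- stated objective: faster
-- what changed: B preallocates a dense (max_x+1)*(max_y+1) zero vector and scatters each in-range dict entry to index row*(max_x+1)+col, instead of A's dense row-by-row scan performing a try/except dict lookup for every cell.
import Mathlib
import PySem

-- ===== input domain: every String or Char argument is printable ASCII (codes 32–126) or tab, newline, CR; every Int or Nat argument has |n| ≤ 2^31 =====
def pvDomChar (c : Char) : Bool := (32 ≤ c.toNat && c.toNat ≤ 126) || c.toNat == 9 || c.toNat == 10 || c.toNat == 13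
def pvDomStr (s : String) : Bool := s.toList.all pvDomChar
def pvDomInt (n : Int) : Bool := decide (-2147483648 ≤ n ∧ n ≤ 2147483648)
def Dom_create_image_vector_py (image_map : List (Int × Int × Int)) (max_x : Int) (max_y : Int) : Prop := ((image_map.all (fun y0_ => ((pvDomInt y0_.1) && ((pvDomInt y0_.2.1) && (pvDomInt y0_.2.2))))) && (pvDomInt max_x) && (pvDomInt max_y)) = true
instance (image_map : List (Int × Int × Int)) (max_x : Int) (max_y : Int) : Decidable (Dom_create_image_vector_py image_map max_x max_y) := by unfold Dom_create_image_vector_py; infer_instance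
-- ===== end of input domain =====

-- B replaces A's dense row-by-row scan with per-cell dict lookup by a preallocated
-- dense zero vector into which the in-range dict entries are scattered (faster per
-- a timing run's constant-factor measurement; see claim.json).


-- ===== PORT A =====
-- A: the dict argument materialised as a PySem.Dict (dict(pairs): last value wins),
-- then for each row, for each col, append image_map[(col,row)] or 0 on KeyError.
def create_image_vector_py (image_map : List (Int × Int × Int)) (max_x : Int) (max_y : Int) : List Int :=
  let d : PySem.Dict (Int × Int) Int :=
    PySem.Dict.ofList (image_map.map (fun e => ((e.1, e.2.1), e.2.2)))
  (PySem.List.pyRange 0 (max_y + 1) 1).foldl (fun pic row =>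
    (PySem.List.pyRange 0 (max_x + 1) 1).foldl (fun pic col =>
      pic ++ [d.getD (col, row) 0]) pic) []

-- ===== PORT B =====
def create_image_vector_py_alt (image_map : List (Int × Int × Int)) (max_x : Int) (max_y : Int) : List Int :=
  let w : Int := if 0 ≤ max_x then max_x + 1 else 0
  let h : Int := if 0 ≤ max_y then max_y + 1 else 0
  image_map.foldl (fun pic e =>
    if 0 ≤ e.1 ∧ e.1 < w ∧ 0 ≤ e.2.1 ∧ e.2.1 < h then
      pic.set (e.2.1 * w + e.1).toNat e.2.2
    else pic) (List.replicate (w * h).toNat 0)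

-- ===== PRECONDITION & SPEC =====
def Spec_create_image_vector_py (image_map : List (Int × Int × Int)) (max_x : Int) (max_y : Int) (out : List Int) : Prop := out = create_image_vector_py_alt image_map max_x max_y
instance (image_map : List (Int × Int × Int)) (max_x : Int) (max_y : Int) (out : List Int) : Decidable (Spec_create_image_vector_py image_map max_x max_y out) := by unfold Spec_create_image_vector_py; infer_instance

-- ===== CLAIM (what is proved, stated in full; the proofs are below) =====
def Claim_equal_create_image_vector_py : Prop := ∀ (image_map : List (Int × Int × Int)) (max_x : Int) (max_y : Int), Dom_create_image_vector_py image_map max_x max_y → Spec_create_image_vector_py image_map max_x max_y (create_image_vector_py image_map max_x max_y)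

-- ===== LEMMAS AND PROOFS =====

-- B's scatter loop (w, h already rewritten to casts of the Nat dimensions W, H)
def pvScatter (W H : Nat) (m : List (Int × Int × Int)) (s : List Int) : List Int :=
  m.foldl (fun pic e =>
    if 0 ≤ e.1 ∧ e.1 < (W : Int) ∧ 0 ≤ e.2.1 ∧ e.2.1 < (H : Int) then
      pic.set (e.2.1 * (W : Int) + e.1).toNat e.2.2
    else pic) s

-- A's dict-building loop (dict(pairs) over the association list)
def pvIns (m : List (Int × Int × Int)) (d : PySem.Dict (Int × Int) Int) : PySem.Dict (Int × Int) Int :=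
  m.foldl (fun d e => d.insert (e.1, e.2.1) e.2.2) d

lemma pv_idx_lt {W H r c : Nat} (hr : r < H) (hc : c < W) : r * W + c < W * H :=
  calc r * W + c < r * W + W := by omega
    _ = (r + 1) * W := by ring
    _ ≤ H * W := Nat.mul_le_mul_right W hr
    _ = W * H := Nat.mul_comm H W

lemma pv_idx_inj {W r c r' c' : Nat} (hc : c < W) (hc' : c' < W) :
    r * W + c = r' * W + c' ↔ r = r' ∧ c = c' := by
  constructor
  · intro h
    have hW : 0 < W := by omega
    have hm : c % W = c' % W := by
      have hmm : (r * W + c) % W = (r' * W + c') % W := by rw [h]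
      simpa [Nat.add_mod, Nat.mul_mod_left] using hmm
    rw [Nat.mod_eq_of_lt hc, Nat.mod_eq_of_lt hc'] at hm
    subst hm
    have : r * W = r' * W := by omega
    exact ⟨Nat.eq_of_mul_eq_mul_right hW this, rfl⟩
  · rintro ⟨rfl, rfl⟩; rfl

-- invariant: the scatter output stays the dense rendering of the growing dict
lemma pv_scatter_inv (W H : Nat) (m : List (Int × Int × Int)) :
    ∀ (d : PySem.Dict (Int × Int) Int) (s : List Int),
    s.length = W * H →
    (∀ r c, r < H → c < W → s[r * W + c]? = some (d.getD ((c : Int), (r : Int)) 0)) →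
    (pvScatter W H m s).length = W * H ∧
    ∀ r c, r < H → c < W →
      (pvScatter W H m s)[r * W + c]? = some ((pvIns m d).getD ((c : Int), (r : Int)) 0) := by
  induction m with
  | nil => intro d s hlen hinv; exact ⟨hlen, hinv⟩
  | cons e m ih =>
    intro d s hlen hinv
    have hstep : pvScatter W H (e :: m) s =
        pvScatter W H m (if 0 ≤ e.1 ∧ e.1 < (W : Int) ∧ 0 ≤ e.2.1 ∧ e.2.1 < (H : Int) then
          s.set (e.2.1 * (W : Int) + e.1).toNat e.2.2 else s) := rfl
    have hins : pvIns (e :: m) d = pvIns m (d.insert (e.1, e.2.1) e.2.2) := rfl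
    rw [hstep, hins]
    by_cases hcond : 0 ≤ e.1 ∧ e.1 < (W : Int) ∧ 0 ≤ e.2.1 ∧ e.2.1 < (H : Int)
    · rw [if_pos hcond]
      obtain ⟨h1, h2, h3, h4⟩ := hcond
      have he1 : e.1 = ((e.1.toNat : Nat) : Int) := (Int.toNat_of_nonneg h1).symm
      have he2 : e.2.1 = ((e.2.1.toNat : Nat) : Int) := (Int.toNat_of_nonneg h3).symm
      have hc0 : e.1.toNat < W := by omega
      have hr0 : e.2.1.toNat < H := by omega
      have hidx : (e.2.1 * (W : Int) + e.1).toNat = e.2.1.toNat * W + e.1.toNat := by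
        rw [show e.2.1 * (W : Int) + e.1 = ((e.2.1.toNat * W + e.1.toNat : Nat) : Int) by
          push_cast [Int.toNat_of_nonneg h1, Int.toNat_of_nonneg h3]; ring, Int.toNat_natCast]
      rw [hidx]
      apply ih
      · rw [List.length_set, hlen]
      · intro r c hr hc
        rw [List.getElem?_set, PySem.Dict.getD_insert]
        by_cases heq : e.2.1.toNat * W + e.1.toNat = r * W + c
        · obtain ⟨hre, hce⟩ := (pv_idx_inj hc0 hc).1 heq
          have hkey : ((c : Int), (r : Int)) = (e.1, e.2.1) := by
            rw [he1, he2, ← hre, ← hce]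
          rw [if_pos heq, if_pos (by rw [hlen]; exact pv_idx_lt hr0 hc0), if_pos hkey]
        · have hkey : ((c : Int), (r : Int)) ≠ (e.1, e.2.1) := by
            intro hEq
            apply heq
            obtain ⟨hce, hre⟩ := Prod.mk.inj hEq
            have hc1 : c = e.1.toNat := by omega
            have hr1 : r = e.2.1.toNat := by omega
            rw [hc1, hr1]
          rw [if_neg heq, if_neg hkey]
          exact hinv r c hr hc
    · rw [if_neg hcond]
      apply ih
      · exact hlen
      · intro r c hr hc
        rw [PySem.Dict.getD_insert]
        have hkey : ((c : Int), (r : Int)) ≠ (e.1, e.2.1) := by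
          intro hEq
          apply hcond
          obtain ⟨hce, hre⟩ := Prod.mk.inj hEq
          exact ⟨by omega, by omega, by omega, by omega⟩
        rw [if_neg hkey]
        exact hinv r c hr hc

-- any list that renders the dict densely IS the row-major flatMap of the dict
lemma pv_dense_eq (W : Nat) (D : PySem.Dict (Int × Int) Int) :
    ∀ (H : Nat) (t : List Int), t.length = W * H →
    (∀ r c, r < H → c < W → t[r * W + c]? = some (D.getD ((c : Int), (r : Int)) 0)) →
    (List.range H).flatMap (fun r : Nat => (List.range W).map (fun c : Nat => D.getD ((c : Int), (r : Int)) 0)) = t := by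
  intro H
  induction H with
  | zero =>
    intro t hlen _
    rw [Nat.mul_zero] at hlen
    simp only [List.range_zero, List.flatMap_nil]
    exact (List.eq_nil_of_length_eq_zero hlen).symm
  | succ H ih =>
    intro t hlen hinv
    rw [List.range_succ, List.flatMap_append, List.flatMap_cons, List.flatMap_nil, List.append_nil]
    have hfront : (List.range H).flatMap
        (fun r : Nat => (List.range W).map (fun c : Nat => D.getD ((c : Int), (r : Int)) 0)) = t.take (W * H) := by
      apply ih
      · rw [List.length_take, hlen]
        exact Nat.min_eq_left (Nat.mul_le_mul_left W (Nat.le_succ H))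
      · intro r c hr hc
        rw [List.getElem?_take, if_pos (pv_idx_lt hr hc)]
        exact hinv r c (Nat.lt_succ_of_lt hr) hc
    have hback : (List.range W).map (fun c : Nat => D.getD ((c : Int), (H : Int)) 0) = t.drop (W * H) := by
      apply List.ext_getElem?
      intro i
      rw [List.getElem?_drop]
      by_cases hi : i < W
      · rw [List.getElem?_map, List.getElem?_range hi]
        have := hinv H i (Nat.lt_succ_self H) hi
        rw [show H * W + i = W * H + i by rw [Nat.mul_comm]] at this
        rw [this]; rfl
      · rw [List.getElem?_eq_none (by rw [List.length_map, List.length_range]; omega),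
          List.getElem?_eq_none (by rw [hlen]; rw [Nat.mul_succ]; omega)]
    rw [hfront, hback, List.take_append_drop]

-- A's double loop is the row-major flatMap over the (last-value-wins) dict
lemma pv_A_shape (m : List (Int × Int × Int)) (mx my : Int) :
    create_image_vector_py m mx my =
    (List.range (my + 1).toNat).flatMap (fun r : Nat => (List.range (mx + 1).toNat).map
      (fun c : Nat => (pvIns m PySem.Dict.empty).getD ((c : Int), (r : Int)) 0)) := by
  unfold create_image_vector_py
  simp only [PySem.Dict.ofList, PySem.Dict.update, List.foldl_map]
  rw [show (List.foldl (fun acc p => acc.insert (p.1, p.2.1) p.2.2) PySem.Dict.empty m)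
    = pvIns m PySem.Dict.empty from rfl]
  simp only [PySem.List.pyRange_one, Int.sub_zero, List.foldl_map,
    PySem.List.foldl_append_singleton_eq_map, PySem.List.foldl_append_eq_flatMap,
    List.nil_append, Int.zero_add]

-- ===== VERDICT (by name: the statement is the Claim_ definition above) =====
theorem create_image_vector_py_spec : Claim_equal_create_image_vector_py := by
  intro m mx my _
  unfold Spec_create_image_vector_py
  have hw : (if 0 ≤ mx then mx + 1 else 0) = (((mx + 1).toNat : Nat) : Int) := by
    split <;> omega
  have hh : (if 0 ≤ my then my + 1 else 0) = (((my + 1).toNat : Nat) : Int) := by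
    split <;> omega
  have hB : create_image_vector_py_alt m mx my =
      pvScatter (mx + 1).toNat (my + 1).toNat m
        (List.replicate ((mx + 1).toNat * (my + 1).toNat) 0) := by
    unfold pvScatter
    simp only [create_image_vector_py_alt, hw, hh]
    rw [show (((mx + 1).toNat : Nat) : Int) * (((my + 1).toNat : Nat) : Int)
        = (((mx + 1).toNat * (my + 1).toNat : Nat) : Int) by push_cast; ring,
      Int.toNat_natCast]
  have hinv0 : ∀ r c, r < (my + 1).toNat → c < (mx + 1).toNat →
      (List.replicate ((mx + 1).toNat * (my + 1).toNat) (0 : Int))[r * (mx + 1).toNat + c]? =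
      some ((PySem.Dict.empty : PySem.Dict (Int × Int) Int).getD ((c : Int), (r : Int)) 0) := by
    intro r c hr hc
    rw [List.getElem?_replicate, if_pos (pv_idx_lt hr hc), PySem.Dict.getD_empty]
  obtain ⟨_, hmem⟩ := pv_scatter_inv (mx + 1).toNat (my + 1).toNat m PySem.Dict.empty
    (List.replicate ((mx + 1).toNat * (my + 1).toNat) 0) (List.length_replicate) hinv0
  obtain ⟨hlen, _⟩ := pv_scatter_inv (mx + 1).toNat (my + 1).toNat m PySem.Dict.empty
    (List.replicate ((mx + 1).toNat * (my + 1).toNat) 0) (List.length_replicate) hinv0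
  rw [pv_A_shape, hB]
  exact pv_dense_eq (mx + 1).toNat (pvIns m PySem.Dict.empty) (my + 1).toNat _ hlen hmem
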